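-- pv_equiv track=rewrite | github.com/naomichx/splitter-cells | analysis/single_cell_analysis.py | find_activity_ranges
-- ===== SOURCE A (Python) =====
-- def find_activity_ranges(locations, locations_indexes):
--     """
--     This function determines the ranges of activity indexes for different pathways in the central corridor,
--     including:
--     - Right to left (R-L)
--     - Left to right (L-R)
--     - Left to left (L-L)
--     - Right to right (R-R)
--
--     Args:
--     locations (list): A list of location identifiers ('m', 'r', 'l').
--     locations_indexes (list): A list of corresponding indexes for each identified location.
--
--     Returns:
--     dict: A dictionary containing activity ranges for each pathway:
--         - 'RL': Activity ranges for right to left pathway.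
--         - 'LR': Activity ranges for left to right pathway.
--         - 'RR': Activity ranges for right to right pathway.
--         - 'LL': Activity ranges for left to left pathway.
--         - 'r_loop': Activity ranges for the right loop.
--         - 'l_loop': Activity ranges for the left loop.
--     """
--
--     activity_ranges = {'RL': [], 'LR': [], 'RR': [], 'LL': [], 'r_loop':[], 'l_loop':[]}
--     for i in range(1, len(locations) - 1):
--         if locations[i] == 'm':
--             if locations[i-1] == 'r':
--                 activity_ranges['r_loop'].append([locations_indexes[i-1], locations_indexes[i]])
--                 if locations[i+1] == 'r':
--                     activity_ranges['RR'].append([locations_indexes[i], locations_indexes[i]+100])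
--                 elif locations[i+1] == 'l':
--                     activity_ranges['RL'].append([locations_indexes[i], locations_indexes[i]+100])
--             elif locations[i-1] == 'l':
--                 activity_ranges['l_loop'].append([locations_indexes[i - 1], locations_indexes[i]])
--                 if locations[i+1] == 'r':
--                     activity_ranges['LR'].append([locations_indexes[i], locations_indexes[i]+100])
--                 elif locations[i+1] == 'l':
--                     activity_ranges['LL'].append([locations_indexes[i], locations_indexes[i]+100])
--     return activity_ranges
-- ===== SOURCE B (Python) =====
-- def find_activity_ranges(locations, locations_indexes):
--     # One zipped window list, then one comprehension per pathway.
--     windows = list(zip(locations, locations[1:], locations[2:],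
--                        locations_indexes, locations_indexes[1:]))
--     return {
--         'RL': [[j, j + 100] for p, c, n, i, j in windows if c == 'm' and p == 'r' and n == 'l'],
--         'LR': [[j, j + 100] for p, c, n, i, j in windows if c == 'm' and p == 'l' and n == 'r'],
--         'RR': [[j, j + 100] for p, c, n, i, j in windows if c == 'm' and p == 'r' and n == 'r'],
--         'LL': [[j, j + 100] for p, c, n, i, j in windows if c == 'm' and p == 'l' and n == 'l'],
--         'r_loop': [[i, j] for p, c, n, i, j in windows if c == 'm' and p == 'r'],
--         'l_loop': [[i, j] for p, c, n, i, j in windows if c == 'm' and p == 'l'],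
--     }
-- ===== Notes on version B (the rewrite author's own statement) =====
-- stated objective: idiomatic
-- what changed: A's single index loop with two-level nested if/elif branching and in-place dict appends is replaced by building one zipped window list (prev, cur, next, idx_prev, idx_cur) and deriving each of the six pathway lists with its own independent comprehension over it.
import Mathlib
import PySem

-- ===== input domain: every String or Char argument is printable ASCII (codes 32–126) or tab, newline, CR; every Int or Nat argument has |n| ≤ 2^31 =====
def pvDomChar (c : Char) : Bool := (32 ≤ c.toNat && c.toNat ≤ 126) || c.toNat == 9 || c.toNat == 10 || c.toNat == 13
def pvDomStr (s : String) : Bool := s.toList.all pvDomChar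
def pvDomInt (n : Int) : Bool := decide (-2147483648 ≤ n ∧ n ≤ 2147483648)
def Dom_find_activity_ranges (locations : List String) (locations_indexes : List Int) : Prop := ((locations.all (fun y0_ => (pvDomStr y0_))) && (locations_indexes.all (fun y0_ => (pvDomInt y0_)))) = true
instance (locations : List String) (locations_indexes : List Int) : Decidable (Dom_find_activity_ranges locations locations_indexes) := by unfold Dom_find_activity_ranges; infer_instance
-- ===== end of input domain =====

-- B replaces A's index loop with nested branching by one zipped window list and six
-- independent comprehensions (idiomatic; same cost). Equivalence of return values on Pre_.

-- ===== PORT A =====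
-- A's dict has six fixed keys created up front and only list-appends afterwards; it is
-- modeled as a six-field record assembled into the association list at return.
structure pvSt where
  rl : List (List Int)
  lr : List (List Int)
  rr : List (List Int)
  ll : List (List Int)
  rloop : List (List Int)
  lloop : List (List Int)
deriving DecidableEq, Repr

-- one iteration of A's loop body (locations[i] accesses are pyGetD, total under Pre_)
def pvStepA (locations : List String) (locations_indexes : List Int) (s : pvSt) (i : Int) : pvSt :=
  if PySem.List.pyGetD locations i "" = "m" then
    if PySem.List.pyGetD locations (i-1) "" = "r" then
      let s := { s with rloop := s.rloop ++ [[PySem.List.pyGetD locations_indexes (i-1) 0, PySem.List.pyGetD locations_indexes i 0]] }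
      if PySem.List.pyGetD locations (i+1) "" = "r" then
        { s with rr := s.rr ++ [[PySem.List.pyGetD locations_indexes i 0, PySem.List.pyGetD locations_indexes i 0 + 100]] }
      else if PySem.List.pyGetD locations (i+1) "" = "l" then
        { s with rl := s.rl ++ [[PySem.List.pyGetD locations_indexes i 0, PySem.List.pyGetD locations_indexes i 0 + 100]] }
      else s
    else if PySem.List.pyGetD locations (i-1) "" = "l" then
      let s := { s with lloop := s.lloop ++ [[PySem.List.pyGetD locations_indexes (i-1) 0, PySem.List.pyGetD locations_indexes i 0]] }
      if PySem.List.pyGetD locations (i+1) "" = "r" then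
        { s with lr := s.lr ++ [[PySem.List.pyGetD locations_indexes i 0, PySem.List.pyGetD locations_indexes i 0 + 100]] }
      else if PySem.List.pyGetD locations (i+1) "" = "l" then
        { s with ll := s.ll ++ [[PySem.List.pyGetD locations_indexes i 0, PySem.List.pyGetD locations_indexes i 0 + 100]] }
      else s
    else s
  else s

def find_activity_ranges (locations : List String) (locations_indexes : List Int) : List (String × List (List Int)) :=
  let st := (PySem.List.pyRange 1 ((locations.length : Int) - 1) 1).foldl
      (pvStepA locations locations_indexes) ⟨[], [], [], [], [], []⟩
  [("RL", st.rl), ("LR", st.lr), ("RR", st.rr), ("LL", st.ll),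
   ("r_loop", st.rloop), ("l_loop", st.lloop)]

-- ===== PORT B =====
-- zip(locations, locations[1:], locations[2:], locations_indexes, locations_indexes[1:]):
-- 5-ary zip written as the obvious recursion (truncates at the shortest, like Python's zip)
def pvWindows : List String → List Int → List (String × String × String × Int × Int)
  | p :: c :: nx :: ls, i :: j :: is => (p, c, nx, i, j) :: pvWindows (c :: nx :: ls) (j :: is)
  | _, _ => []

-- the comprehension '[e for (p,c,n,i,j) in windows if cond]' as a filterMap
def pvPair (w : List (String × String × String × Int × Int)) (P Q : String) : List (List Int) :=
  w.filterMap (fun t => if t.2.1 = "m" ∧ t.1 = P ∧ t.2.2.1 = Q then some [t.2.2.2.2, t.2.2.2.2 + 100] else none)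

def pvLoop (w : List (String × String × String × Int × Int)) (P : String) : List (List Int) :=
  w.filterMap (fun t => if t.2.1 = "m" ∧ t.1 = P then some [t.2.2.2.1, t.2.2.2.2] else none)

def find_activity_ranges_alt (locations : List String) (locations_indexes : List Int) : List (String × List (List Int)) :=
  let w := pvWindows locations locations_indexes
  [("RL", pvPair w "r" "l"), ("LR", pvPair w "l" "r"), ("RR", pvPair w "r" "r"), ("LL", pvPair w "l" "l"),
   ("r_loop", pvLoop w "r"), ("l_loop", pvLoop w "l")]

-- ===== PRECONDITION & SPEC =====
-- Pre_ excludes exactly the inputs where A raises IndexError: an interior 'm' preceded by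
-- 'r' or 'l' whose index reaches past locations_indexes.
def Pre_find_activity_ranges (locations : List String) (locations_indexes : List Int) : Prop :=
  ∀ i, i < locations.length → (1 ≤ i → i + 1 < locations.length →
    locations.getD i "" = "m" → (locations.getD (i-1) "" = "r" ∨ locations.getD (i-1) "" = "l") →
    i < locations_indexes.length)
instance (locations : List String) (locations_indexes : List Int) : Decidable (Pre_find_activity_ranges locations locations_indexes) := by unfold Pre_find_activity_ranges; infer_instance

def pvWitness_find_activity_ranges : List String × List Int := (["r", "m", "l"], [0, 5, 10])

def Spec_find_activity_ranges (locations : List String) (locations_indexes : List Int) (out : List (String × List (List Int))) : Prop := out = find_activity_ranges_alt locations locations_indexes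
instance (locations : List String) (locations_indexes : List Int) (out : List (String × List (List Int))) : Decidable (Spec_find_activity_ranges locations locations_indexes out) := by unfold Spec_find_activity_ranges; infer_instance

-- ===== CLAIM (what is proved, stated in full; the proofs are below) =====
def Claim_equal_find_activity_ranges : Prop := ∀ (locations : List String) (locations_indexes : List Int), Dom_find_activity_ranges locations locations_indexes → Pre_find_activity_ranges locations locations_indexes → Spec_find_activity_ranges locations locations_indexes (find_activity_ranges locations locations_indexes)

-- ===== LEMMAS AND PROOFS =====

-- conjunction forms of the per-position contributions of A's loop body
def pvFPair (locations : List String) (locations_indexes : List Int) (P Q : String) (i : Int) : Option (List Int) :=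
  if PySem.List.pyGetD locations i "" = "m" ∧ PySem.List.pyGetD locations (i-1) "" = P ∧ PySem.List.pyGetD locations (i+1) "" = Q
  then some [PySem.List.pyGetD locations_indexes i 0, PySem.List.pyGetD locations_indexes i 0 + 100] else none

def pvFLoop (locations : List String) (locations_indexes : List Int) (P : String) (i : Int) : Option (List Int) :=
  if PySem.List.pyGetD locations i "" = "m" ∧ PySem.List.pyGetD locations (i-1) "" = P
  then some [PySem.List.pyGetD locations_indexes (i-1) 0, PySem.List.pyGetD locations_indexes i 0] else none

lemma pvFilterMap_cons {α β : Type} (f : α → Option β) (a : α) (l : List α) :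
    (a :: l).filterMap f = (f a).toList ++ l.filterMap f := by
  cases h : f a <;> simp [h]

lemma pvStepA_eq (locations : List String) (locations_indexes : List Int) (s : pvSt) (i : Int) :
    pvStepA locations locations_indexes s i =
      ⟨s.rl ++ (pvFPair locations locations_indexes "r" "l" i).toList,
       s.lr ++ (pvFPair locations locations_indexes "l" "r" i).toList,
       s.rr ++ (pvFPair locations locations_indexes "r" "r" i).toList,
       s.ll ++ (pvFPair locations locations_indexes "l" "l" i).toList,
       s.rloop ++ (pvFLoop locations locations_indexes "r" i).toList,
       s.lloop ++ (pvFLoop locations locations_indexes "l" i).toList⟩ := by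
  unfold pvStepA pvFPair pvFLoop
  split_ifs <;> simp_all

lemma pvFold_eq (locations : List String) (locations_indexes : List Int) (L : List Int) (s : pvSt) :
    L.foldl (pvStepA locations locations_indexes) s =
      ⟨s.rl ++ L.filterMap (pvFPair locations locations_indexes "r" "l"),
       s.lr ++ L.filterMap (pvFPair locations locations_indexes "l" "r"),
       s.rr ++ L.filterMap (pvFPair locations locations_indexes "r" "r"),
       s.ll ++ L.filterMap (pvFPair locations locations_indexes "l" "l"),
       s.rloop ++ L.filterMap (pvFLoop locations locations_indexes "r"),
       s.lloop ++ L.filterMap (pvFLoop locations locations_indexes "l")⟩ := by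
  induction L generalizing s with
  | nil => simp
  | cons a L ih =>
    simp only [List.foldl_cons]
    rw [pvStepA_eq, ih]
    simp [pvFilterMap_cons, List.append_assoc]

lemma pvWindows_length (ls : List String) (is : List Int) :
    (pvWindows ls is).length = min (ls.length - 2) (is.length - 1) := by
  induction ls, is using pvWindows.induct with
  | case1 p c nx ls i j is ih =>
    simp only [pvWindows, List.length_cons, ih]
    omega
  | case2 ls is h => cases ls with
    | nil => simp [pvWindows]
    | cons a t => cases t with
      | nil => simp [pvWindows]
      | cons b u => cases u with
        | nil => simp [pvWindows]
        | cons e v => cases is with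
          | nil => simp [pvWindows]
          | cons x w => cases w with
            | nil => simp [pvWindows]
            | cons y z => exact absurd rfl (by exact fun hh => h a b e v x y z hh rfl)

lemma pvWindows_getElem (ls : List String) (is : List Int) (k : Nat)
    (hk : k < (pvWindows ls is).length) :
    (pvWindows ls is)[k] =
      (ls.getD k "", ls.getD (k+1) "", ls.getD (k+2) "", is.getD k 0, is.getD (k+1) 0) := by
  induction ls, is using pvWindows.induct generalizing k with
  | case1 p c nx ls i j is ih =>
    cases k with
    | zero => simp [pvWindows]
    | succ k =>
      simp only [pvWindows] at hk ⊢
      rw [List.getElem_cons_succ, ih k (by simpa using hk)]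
      simp [List.getD]
  | case2 ls is h =>
    exfalso
    cases ls with
    | nil => simp [pvWindows] at hk
    | cons a t => cases t with
      | nil => simp [pvWindows] at hk
      | cons b u => cases u with
        | nil => simp [pvWindows] at hk
        | cons e v => cases is with
          | nil => simp [pvWindows] at hk
          | cons x w => cases w with
            | nil => simp [pvWindows] at hk
            | cons y z => exact h a b e v x y z rfl rfl

-- windows as a map over positions
lemma pvWindows_eq_map (ls : List String) (is : List Int) :
    pvWindows ls is = (List.range (min (ls.length - 2) (is.length - 1))).map
      (fun k => (ls.getD k "", ls.getD (k+1) "", ls.getD (k+2) "", is.getD k 0, is.getD (k+1) 0)) := by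
  apply List.ext_getElem
  · simp [pvWindows_length]
  · intro k h1 h2
    rw [pvWindows_getElem ls is k h1]
    simp

-- cast bookkeeping: A's contribution at position 1 + k equals the window-form condition
lemma pvFPair_cast (locations : List String) (locations_indexes : List Int) (P Q : String) (k : Nat) :
    pvFPair locations locations_indexes P Q (1 + (k : Int)) =
      (if locations.getD (k+1) "" = "m" ∧ locations.getD k "" = P ∧ locations.getD (k+2) "" = Q
       then some [locations_indexes.getD (k+1) 0, locations_indexes.getD (k+1) 0 + 100] else none) := by
  have e1 : (1 : Int) + (k : Int) = ((k+1 : Nat) : Int) := by omega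
  have e2 : (1 : Int) + (k : Int) - 1 = ((k : Nat) : Int) := by omega
  have e3 : (1 : Int) + (k : Int) + 1 = ((k+2 : Nat) : Int) := by omega
  unfold pvFPair
  rw [e2, e3, e1]
  simp only [PySem.List.pyGetD_natCast]

lemma pvFLoop_cast (locations : List String) (locations_indexes : List Int) (P : String) (k : Nat) :
    pvFLoop locations locations_indexes P (1 + (k : Int)) =
      (if locations.getD (k+1) "" = "m" ∧ locations.getD k "" = P
       then some [locations_indexes.getD k 0, locations_indexes.getD (k+1) 0] else none) := by
  have e1 : (1 : Int) + (k : Int) = ((k+1 : Nat) : Int) := by omega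
  have e2 : (1 : Int) + (k : Int) - 1 = ((k : Nat) : Int) := by omega
  unfold pvFLoop
  rw [e2, e1]
  simp only [PySem.List.pyGetD_natCast]

-- under Pre_, positions beyond the window list contribute nothing
lemma pvTail_none (locations : List String) (locations_indexes : List Int)
    (hp : Pre_find_activity_ranges locations locations_indexes)
    (k : Nat) (hW : min (locations.length - 2) (locations_indexes.length - 1) ≤ k)
    (hN : k < locations.length - 2) :
    (∀ P Q, (P = "r" ∨ P = "l") → pvFPair locations locations_indexes P Q (1 + (k : Int)) = none) ∧
    (∀ P, (P = "r" ∨ P = "l") → pvFLoop locations locations_indexes P (1 + (k : Int)) = none) := by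
  have hk2 : k + 2 < locations.length := by omega
  have key : ¬ (locations.getD (k+1) "" = "m" ∧
      (locations.getD k "" = "r" ∨ locations.getD k "" = "l")) := by
    rintro ⟨hm, hrl⟩
    have := hp (k+1) (by omega) (by omega) (by omega) hm (by simpa using hrl)
    omega
  constructor
  · intro P Q hP
    rw [pvFPair_cast, if_neg]
    rintro ⟨hm, hpp, -⟩
    rcases hP with h | h
    · exact key ⟨hm, Or.inl (h ▸ hpp)⟩
    · exact key ⟨hm, Or.inr (h ▸ hpp)⟩
  · intro P hP
    rw [pvFLoop_cast, if_neg]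
    rintro ⟨hm, hpp⟩
    rcases hP with h | h
    · exact key ⟨hm, Or.inl (h ▸ hpp)⟩
    · exact key ⟨hm, Or.inr (h ▸ hpp)⟩

-- the range side of A as positions 0..N-1
lemma pvRange_shape (locations : List String) :
    PySem.List.pyRange 1 ((locations.length : Int) - 1) 1 =
      (List.range (locations.length - 2)).map (fun (k : Nat) => 1 + (k : Int)) := by
  apply List.ext_getElem
  · simp only [PySem.List.length_pyRange_one, List.length_map, List.length_range]
    omega
  · intro k h1 h2
    rw [PySem.List.getElem_pyRange_one]
    simp

-- main component identity
lemma pvComponents (locations : List String) (locations_indexes : List Int)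
    (hp : Pre_find_activity_ranges locations locations_indexes) :
    (∀ P Q, (P = "r" ∨ P = "l") →
      (PySem.List.pyRange 1 ((locations.length : Int) - 1) 1).filterMap
        (pvFPair locations locations_indexes P Q) =
      pvPair (pvWindows locations locations_indexes) P Q) ∧
    (∀ P, (P = "r" ∨ P = "l") →
      (PySem.List.pyRange 1 ((locations.length : Int) - 1) 1).filterMap
        (pvFLoop locations locations_indexes P) =
      pvLoop (pvWindows locations locations_indexes) P) := by
  set N := locations.length - 2 with hN
  set W := min (locations.length - 2) (locations_indexes.length - 1) with hW
  have hsplit : List.range N = List.range W ++ (List.range (N - W)).map (fun j => W + j) := by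
    have h : N = W + (N - W) := by omega
    have h2 : W + (N - W) - W = N - W := by omega
    rw [h, List.range_add, h2]
  constructor
  · intro P Q hPrl
    have hA : (PySem.List.pyRange 1 ((locations.length : Int) - 1) 1).filterMap
        (pvFPair locations locations_indexes P Q) =
        (List.range N).filterMap
          (fun (k : Nat) => pvFPair locations locations_indexes P Q (1 + (k : Int))) := by
      rw [pvRange_shape, List.filterMap_map]; rfl
    have hB : pvPair (pvWindows locations locations_indexes) P Q =
        (List.range W).filterMap (fun (k : Nat) =>
          if locations.getD (k+1) "" = "m" ∧ locations.getD k "" = P ∧ locations.getD (k+2) "" = Q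
          then some [locations_indexes.getD (k+1) 0, locations_indexes.getD (k+1) 0 + 100]
          else none) := by
      rw [pvPair, pvWindows_eq_map, List.filterMap_map]; rfl
    rw [hA, hB, hsplit, List.filterMap_append]
    have htail : ((List.range (N - W)).map (fun j => W + j)).filterMap
        (fun (k : Nat) => pvFPair locations locations_indexes P Q (1 + (k : Int))) = [] := by
      rw [List.filterMap_map]
      apply List.filterMap_eq_nil_iff.mpr
      intro j hj
      simp only [List.mem_range] at hj
      simpa using (pvTail_none locations locations_indexes hp (W + j)
        (by omega) (by omega)).1 P Q hPrl
    rw [htail, List.append_nil]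
    apply List.filterMap_congr
    intro k _
    exact pvFPair_cast locations locations_indexes P Q k
  · intro P hPrl
    have hA : (PySem.List.pyRange 1 ((locations.length : Int) - 1) 1).filterMap
        (pvFLoop locations locations_indexes P) =
        (List.range N).filterMap
          (fun (k : Nat) => pvFLoop locations locations_indexes P (1 + (k : Int))) := by
      rw [pvRange_shape, List.filterMap_map]; rfl
    have hB : pvLoop (pvWindows locations locations_indexes) P =
        (List.range W).filterMap (fun (k : Nat) =>
          if locations.getD (k+1) "" = "m" ∧ locations.getD k "" = P
          then some [locations_indexes.getD k 0, locations_indexes.getD (k+1) 0]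
          else none) := by
      rw [pvLoop, pvWindows_eq_map, List.filterMap_map]; rfl
    rw [hA, hB, hsplit, List.filterMap_append]
    have htail : ((List.range (N - W)).map (fun j => W + j)).filterMap
        (fun (k : Nat) => pvFLoop locations locations_indexes P (1 + (k : Int))) = [] := by
      rw [List.filterMap_map]
      apply List.filterMap_eq_nil_iff.mpr
      intro j hj
      simp only [List.mem_range] at hj
      simpa using (pvTail_none locations locations_indexes hp (W + j)
        (by omega) (by omega)).2 P hPrl
    rw [htail, List.append_nil]
    apply List.filterMap_congr
    intro k _
    exact pvFLoop_cast locations locations_indexes P k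

-- ===== VERDICT (by name: the statement is the Claim_ definition above) =====
theorem find_activity_ranges_spec : Claim_equal_find_activity_ranges := by
  intro locations locations_indexes _ hp
  unfold Spec_find_activity_ranges find_activity_ranges find_activity_ranges_alt
  rw [pvFold_eq]
  obtain ⟨hpair, hloop⟩ := pvComponents locations locations_indexes hp
  simp only [List.nil_append]
  rw [hpair "r" "l" (by simp), hpair "l" "r" (by simp),
      hpair "r" "r" (by simp), hpair "l" "l" (by simp),
      hloop "r" (by simp), hloop "l" (by simp)]
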